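-- pv_equiv track=rewrite | github.com/Dieren-F/Lab4-Informatics | jsonparsewithre.py | atom
-- ===== SOURCE A (Python) =====
-- def atom(txt):
--     cnt =0
--     for x in txt:
--         if x=='"':
--             cnt += 1
--         if x in ['{', '['] and cnt%2==0:
--             return False
--     return True
-- ===== SOURCE B (Python) =====
-- def atom(txt):
--     return not any('{' in s or '[' in s
--                    for i, s in enumerate(txt.split('"')) if i % 2 == 0)
-- ===== Notes on version B (the rewrite author's own statement) =====
-- stated objective: simpler
-- what changed: Replaces the per-character quote-parity counter loop and early return with splitting the text on '"' and checking only the even-indexed (outside-quote) segments for '{' or '[' via a single any() expression.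
import Mathlib
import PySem

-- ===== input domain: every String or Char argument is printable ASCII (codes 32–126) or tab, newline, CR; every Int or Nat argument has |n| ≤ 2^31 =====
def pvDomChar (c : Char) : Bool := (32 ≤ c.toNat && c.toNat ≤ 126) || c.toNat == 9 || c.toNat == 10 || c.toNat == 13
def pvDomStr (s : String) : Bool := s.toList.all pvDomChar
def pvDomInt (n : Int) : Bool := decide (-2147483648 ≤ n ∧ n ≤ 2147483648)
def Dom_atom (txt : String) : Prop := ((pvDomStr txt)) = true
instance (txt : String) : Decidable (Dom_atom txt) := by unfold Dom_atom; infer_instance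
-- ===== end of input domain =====

-- B replaces A's per-character quote-parity counter with split-on-'"' and a scan of the
-- even-indexed (outside-quote) segments for '{' or '[' (objective: simpler).

-- ===== PORT A =====
-- the for-loop over txt with counter cnt and early 'return False'
def atomLoop : List Char → Int → Bool
  | [], _ => true
  | x :: rest, cnt =>
      let cnt' := if x == '"' then cnt + 1 else cnt
      if ['{', '['].contains x && PySem.Int.mod cnt' 2 == 0 then false
      else atomLoop rest cnt'

def atom (txt : String) : Bool := atomLoop txt.toList 0

-- ===== PORT B =====
def atom_alt (txt : String) : Bool :=
  !((PySem.List.enumerate (PySem.Chars.splitOn txt.toList ['"']) 0).any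
      (fun is => PySem.Int.mod is.1 2 == 0 && (is.2.contains '{' || is.2.contains '[')))

-- ===== PRECONDITION & SPEC =====
def Spec_atom (txt : String) (out : Bool) : Prop := out = atom_alt txt
instance (txt : String) (out : Bool) : Decidable (Spec_atom txt out) := by unfold Spec_atom; infer_instance

-- ===== CLAIM (what is proved, stated in full; the proofs are below) =====
def Claim_equal_atom : Prop := ∀ (txt : String), Dom_atom txt → Spec_atom txt (atom txt)

-- ===== LEMMAS AND PROOFS =====

-- proof-side model of split('"') built structurally
def pvSplit : List Char → List (List Char)
  | [] => [[]]
  | c :: rest =>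
      if c = '"' then [] :: pvSplit rest
      else (c :: (pvSplit rest).headD []) :: (pvSplit rest).tail

def pvHasBr (s : List Char) : Bool := s.contains '{' || s.contains '['

-- "some segment at a checked-parity position contains a bracket"; p = current position is checked
def pvBad : Bool → List (List Char) → Bool
  | _, [] => false
  | p, s :: rest => (p && pvHasBr s) || pvBad (!p) rest

lemma pvSplit_ne_nil (l : List Char) : pvSplit l ≠ [] := by
  cases l with
  | nil => simp [pvSplit]
  | cons c rest => simp only [pvSplit]; split <;> simp

lemma pvParityFlip (n : Int) : ((PySem.Int.mod (n + 1) 2 == 0) : Bool) = !(PySem.Int.mod n 2 == 0) := by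
  rw [show PySem.Int.mod (n + 1) 2 = (n + 1) % 2 from PySem.Int.mod_eq_emod_of_pos (by omega),
      show PySem.Int.mod n 2 = n % 2 from PySem.Int.mod_eq_emod_of_pos (by omega)]
  have h1 : (n + 1) % 2 = 1 - n % 2 := by omega
  rcases Int.emod_two_eq n with h | h <;> simp [h1, h]

lemma pvGoEq (fuel : Nat) : ∀ (l cur : List Char) (accs : List (List Char)),
    l.length < fuel →
    PySem.Chars.splitOn.go ['"'] fuel l cur accs
      = accs.reverse ++ (pvSplit l).modifyHead (cur.reverse ++ ·) := by
  induction fuel with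
  | zero => intro l cur accs h; omega
  | succ fuel ih =>
    intro l cur accs h
    cases l with
    | nil =>
      show (cur.reverse :: accs).reverse = accs.reverse ++ (pvSplit []).modifyHead (cur.reverse ++ ·)
      simp [pvSplit]
    | cons c rest =>
      show (if List.isPrefixOf ['"'] (c :: rest) = true then
              PySem.Chars.splitOn.go ['"'] fuel (List.drop (['"'].length) (c :: rest)) []
                (cur.reverse :: accs)
            else PySem.Chars.splitOn.go ['"'] fuel rest (c :: cur) accs)
          = accs.reverse ++ (pvSplit (c :: rest)).modifyHead (cur.reverse ++ ·)
      by_cases hq : c = '"'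
      · subst hq
        have hpre : List.isPrefixOf ['"'] ('"' :: rest) = true := by simp [List.isPrefixOf]
        rw [if_pos hpre, show List.drop (['"'].length) ('"' :: rest) = rest from rfl]
        rw [ih rest [] (cur.reverse :: accs) (by simpa using Nat.lt_of_succ_lt_succ (by simpa using h))]
        cases hsp : pvSplit rest with
        | nil => exact absurd hsp (pvSplit_ne_nil rest)
        | cons s ss => simp [pvSplit, hsp]
      · have hpre : List.isPrefixOf ['"'] (c :: rest) = false := by
          simp [List.isPrefixOf]; intro hc; exact absurd hc.symm hq
        rw [if_neg (by simp [hpre])]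
        rw [ih rest (c :: cur) accs (by simpa using Nat.lt_of_succ_lt_succ (by simpa using h))]
        cases hsp : pvSplit rest with
        | nil => exact absurd hsp (pvSplit_ne_nil rest)
        | cons s ss => simp [pvSplit, hsp, hq]

lemma pvSplitOnEq (l : List Char) : PySem.Chars.splitOn l ['"'] = pvSplit l := by
  rw [PySem.Chars.splitOn]
  rw [pvGoEq (l.length + 1) l [] [] (by omega)]
  cases hsp : pvSplit l with
  | nil => exact absurd hsp (pvSplit_ne_nil l)
  | cons s ss => simp

lemma pvLoopEq (l : List Char) : ∀ (cnt : Int),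
    atomLoop l cnt = !(pvBad (PySem.Int.mod cnt 2 == 0) (pvSplit l)) := by
  induction l with
  | nil =>
    intro cnt
    cases hx : (PySem.Int.mod cnt 2 == 0 : Bool) <;>
      simp [atomLoop, pvSplit, pvBad, pvHasBr]
  | cons c rest ih =>
    intro cnt
    have hflip := pvParityFlip cnt
    by_cases hq : c = '"'
    · subst hq
      have hstep : atomLoop ('"' :: rest) cnt = atomLoop rest (cnt + 1) := by
        simp [atomLoop]
      have hsplit : pvSplit ('"' :: rest) = [] :: pvSplit rest := by simp [pvSplit]
      rw [hstep, ih (cnt + 1), hflip, hsplit]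
      cases hx : (PySem.Int.mod cnt 2 == 0 : Bool) <;> simp [pvBad, pvHasBr]
    · have hcq : (c == '"') = false := by simp [hq]
      have ihc := ih cnt
      cases hsp : pvSplit rest with
      | nil => exact absurd hsp (pvSplit_ne_nil rest)
      | cons s ss =>
        rw [hsp] at ihc
        by_cases hbr : c = '{' ∨ c = '['
        · have hc : (['{', '['].contains c) = true := by
            rcases hbr with h' | h' <;> simp [h']
          have hB : pvHasBr (c :: s) = true := by
            rcases hbr with h' | h' <;> simp [pvHasBr, h']
          simp only [atomLoop, hcq, Bool.false_eq_true, if_false, hc, Bool.true_and, pvSplit,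
            if_neg hq, hsp, List.headD_cons, List.tail_cons]
          cases hx : (PySem.Int.mod cnt 2 == 0 : Bool)
          · rw [hx] at ihc
            simp [ihc, pvBad]
          · simp [pvBad, hB]
        · rw [not_or] at hbr
          have hc : (['{', '['].contains c) = false := by simp [hbr.1, hbr.2]
          have hB : pvHasBr (c :: s) = pvHasBr s := by
            simp [pvHasBr, Ne.symm hbr.1, Ne.symm hbr.2]
          simp only [atomLoop, hcq, if_false, hc, Bool.false_and, Bool.false_eq_true, pvSplit,
            if_neg hq, hsp, List.headD_cons, List.tail_cons]
          cases hx : (PySem.Int.mod cnt 2 == 0 : Bool) <;>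
          · rw [hx] at ihc
            simp [ihc, pvBad, hB]

lemma pvAnyEq (parts : List (List Char)) : ∀ (i : Int),
    ((PySem.List.enumerate parts i).any
      (fun is => PySem.Int.mod is.1 2 == 0 && (is.2.contains '{' || is.2.contains '[')))
      = pvBad (PySem.Int.mod i 2 == 0) parts := by
  induction parts with
  | nil => intro i; simp [PySem.List.enumerate, pvBad]
  | cons s rest ih =>
    intro i
    rw [PySem.List.enumerate_cons]
    simp only [List.any_cons, ih (i + 1), pvParityFlip, pvBad, pvHasBr]

-- ===== VERDICT (by name: the statement is the Claim_ definition above) =====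
theorem atom_spec : Claim_equal_atom := by
  intro txt _
  unfold Spec_atom atom atom_alt
  rw [pvLoopEq, pvSplitOnEq, pvAnyEq]
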